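-- pv_equiv track=rewrite | github.com/hayatos-waseda/gathering | environment/map_loader.py | build_field_from_map
-- ===== SOURCE A (Python) =====
-- def build_field_from_map(grid):
--     h = len(grid)
--     w = len(grid[0])
--
--     field = [[[0,0,0,0] for _ in range(h)] for _ in range(w)]
--
--     for x in range(w):
--         for y in range(h):
--
--             if grid[y][x] == "#":
--                 continue
--
--             if y+1 < h and grid[y+1][x] != "#":
--                 field[x][y][0] = 1
--             if x+1 < w and grid[y][x+1] != "#":
--                 field[x][y][1] = 1
--             if y-1 >= 0 and grid[y-1][x] != "#":
--                 field[x][y][2] = 1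
--             if x-1 >= 0 and grid[y][x-1] != "#":
--                 field[x][y][3] = 1
--
--     return field
-- ===== SOURCE B (Python) =====
-- def build_field_from_map(grid):
--     h = len(grid)
--     w = len(grid[0])
--
--     field = [[[0, 0, 0, 0] for _ in range(h)] for _ in range(w)]
--
--     # horizontal edges: (x,y)-(x+1,y)
--     for y in range(h):
--         for x in range(w - 1):
--             if grid[y][x] != "#" and grid[y][x + 1] != "#":
--                 field[x][y][1] = 1
--                 field[x + 1][y][3] = 1
--
--     # vertical edges: (x,y)-(x,y+1)
--     for y in range(h - 1):
--         for x in range(w):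
--             if grid[y][x] != "#" and grid[y + 1][x] != "#":
--                 field[x][y][0] = 1
--                 field[x][y + 1][2] = 1
--
--     return field
-- ===== Notes on version B (the rewrite author's own statement) =====
-- stated objective: alternative
-- what changed: B replaces A's per-cell probe of all four neighbours with two edge passes: each horizontal and each vertical adjacency between two non-wall cells is visited once and sets both endpoints' direction flags; wall cells stay all-zero automatically.
import Mathlib
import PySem

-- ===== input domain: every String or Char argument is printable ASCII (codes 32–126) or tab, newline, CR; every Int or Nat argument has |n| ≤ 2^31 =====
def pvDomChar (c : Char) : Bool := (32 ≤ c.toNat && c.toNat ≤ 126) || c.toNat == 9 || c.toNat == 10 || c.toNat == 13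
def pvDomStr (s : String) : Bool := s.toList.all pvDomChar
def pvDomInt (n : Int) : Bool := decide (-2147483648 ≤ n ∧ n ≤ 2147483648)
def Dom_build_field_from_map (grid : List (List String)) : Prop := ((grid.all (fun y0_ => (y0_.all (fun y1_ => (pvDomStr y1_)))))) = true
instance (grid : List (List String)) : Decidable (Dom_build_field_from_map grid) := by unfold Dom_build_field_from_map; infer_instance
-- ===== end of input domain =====

-- B is an alternative decomposition of the same task: two symmetric edge passes (each open
-- adjacency sets both endpoints' flags once) instead of A's per-cell probing of all four
-- neighbours; same asymptotic cost.

-- shared transliteration primitives: grid[y][x] (in range under Pre_) and field[x][y][d] = 1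
def pvGget (grid : List (List String)) (y x : Int) : String :=
  PySem.List.pyGetD (PySem.List.pyGetD grid y []) x ""

def pvSet3 (f : List (List (List Int))) (x y : Int) (d : Nat) : List (List (List Int)) :=
  f.modify x.toNat (fun col => col.modify y.toNat (fun cell => cell.set d 1))

-- ===== PORT A =====
-- loop body of A for one cell (x, y)
def pvBodyA (grid : List (List String)) (w h x : Int)
    (field : List (List (List Int))) (y : Int) : List (List (List Int)) :=
  if pvGget grid y x = "#" then field
  else
    let f0 := if y + 1 < h ∧ pvGget grid (y + 1) x ≠ "#" then pvSet3 field x y 0 else field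
    let f1 := if x + 1 < w ∧ pvGget grid y (x + 1) ≠ "#" then pvSet3 f0 x y 1 else f0
    let f2 := if y - 1 ≥ 0 ∧ pvGget grid (y - 1) x ≠ "#" then pvSet3 f1 x y 2 else f1
    if x - 1 ≥ 0 ∧ pvGget grid y (x - 1) ≠ "#" then pvSet3 f2 x y 3 else f2

-- inner loop of A: all y for a fixed x
def pvColA (grid : List (List String)) (w h : Int)
    (field : List (List (List Int))) (x : Int) : List (List (List Int)) :=
  (PySem.List.pyRange 0 h 1).foldl (pvBodyA grid w h x) field

def build_field_from_map (grid : List (List String)) : List (List (List Int)) :=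
  let h : Int := grid.length
  let w : Int := (PySem.List.pyGetD grid 0 ([] : List String)).length
  let field := (PySem.List.pyRange 0 w 1).map
    (fun _ => (PySem.List.pyRange 0 h 1).map (fun _ => ([0, 0, 0, 0] : List Int)))
  (PySem.List.pyRange 0 w 1).foldl (pvColA grid w h) field

-- ===== PORT B =====
-- horizontal-edge body: edge (x,y)-(x+1,y)
def pvBodyH (grid : List (List String)) (y : Int)
    (field : List (List (List Int))) (x : Int) : List (List (List Int)) :=
  if pvGget grid y x ≠ "#" ∧ pvGget grid y (x + 1) ≠ "#" then
    pvSet3 (pvSet3 field x y 1) (x + 1) y 3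
  else field

-- vertical-edge body: edge (x,y)-(x,y+1)
def pvBodyV (grid : List (List String)) (y : Int)
    (field : List (List (List Int))) (x : Int) : List (List (List Int)) :=
  if pvGget grid y x ≠ "#" ∧ pvGget grid (y + 1) x ≠ "#" then
    pvSet3 (pvSet3 field x y 0) x (y + 1) 2
  else field

def pvRowH (grid : List (List String)) (w : Int)
    (field : List (List (List Int))) (y : Int) : List (List (List Int)) :=
  (PySem.List.pyRange 0 (w - 1) 1).foldl (pvBodyH grid y) field

def pvRowV (grid : List (List String)) (w : Int)
    (field : List (List (List Int))) (y : Int) : List (List (List Int)) :=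
  (PySem.List.pyRange 0 w 1).foldl (pvBodyV grid y) field

def build_field_from_map_alt (grid : List (List String)) : List (List (List Int)) :=
  let h : Int := grid.length
  let w : Int := (PySem.List.pyGetD grid 0 ([] : List String)).length
  let field := (PySem.List.pyRange 0 w 1).map
    (fun _ => (PySem.List.pyRange 0 h 1).map (fun _ => ([0, 0, 0, 0] : List Int)))
  let field := (PySem.List.pyRange 0 h 1).foldl (pvRowH grid w) field
  (PySem.List.pyRange 0 (h - 1) 1).foldl (pvRowV grid w) field

-- ===== PRECONDITION & SPEC =====
-- Pre_: exactly where Python A returns: the grid is nonempty (A reads grid[0]) and every row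
-- has at least len(grid[0]) entries (A reads grid[y][x] for every x < len(grid[0])).
def Pre_build_field_from_map (grid : List (List String)) : Prop :=
  grid ≠ [] ∧ ∀ row ∈ grid, (grid.headD []).length ≤ row.length

instance (grid : List (List String)) : Decidable (Pre_build_field_from_map grid) := by
  unfold Pre_build_field_from_map; infer_instance

def pvWitness_build_field_from_map : List (List String) :=
  [[".", "#"], [".", "."]]

def Spec_build_field_from_map (grid : List (List String)) (out : List (List (List Int))) : Prop :=
  out = build_field_from_map_alt grid

instance (grid : List (List String)) (out : List (List (List Int))) :
    Decidable (Spec_build_field_from_map grid out) := by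
  unfold Spec_build_field_from_map; infer_instance

-- ===== CLAIM (what is proved, stated in full; the proofs are below) =====
def Claim_equal_build_field_from_map : Prop :=
  ∀ (grid : List (List String)), Dom_build_field_from_map grid →
    Pre_build_field_from_map grid →
    Spec_build_field_from_map grid (build_field_from_map grid)

-- ===== LEMMAS AND PROOFS =====

-- read field[x][y][d] (0 outside range)
def pvGet3 (f : List (List (List Int))) (x y d : Nat) : Int :=
  ((f.getD x []).getD y []).getD d 0

-- the w×h×4 shape of the field
def pvShape (w h : Int) (f : List (List (List Int))) : Prop :=
  f.length = w.toNat ∧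
  (∀ x : Nat, x < w.toNat → (f.getD x []).length = h.toNat) ∧
  (∀ x y : Nat, x < w.toNat → y < h.toNat → ((f.getD x []).getD y []).length = 4)

abbrev pvOpn (grid : List (List String)) (y x : Int) : Prop := pvGget grid y x ≠ "#"

-- the direction flags A computes for cell (x, y)
abbrev pvCondA (grid : List (List String)) (w h x y : Int) (d : Nat) : Prop :=
  pvOpn grid y x ∧
    ((d = 0 ∧ y + 1 < h ∧ pvOpn grid (y + 1) x) ∨
     (d = 1 ∧ x + 1 < w ∧ pvOpn grid y (x + 1)) ∨
     (d = 2 ∧ y - 1 ≥ 0 ∧ pvOpn grid (y - 1) x) ∨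
     (d = 3 ∧ x - 1 ≥ 0 ∧ pvOpn grid y (x - 1)))

-- the flags set by B's horizontal and vertical edge passes
abbrev pvCondH (grid : List (List String)) (w x y : Int) (d : Nat) : Prop :=
  (d = 1 ∧ x + 1 < w ∧ pvOpn grid y x ∧ pvOpn grid y (x + 1)) ∨
  (d = 3 ∧ 1 ≤ x ∧ x < w ∧ pvOpn grid y (x - 1) ∧ pvOpn grid y x)

abbrev pvCondV (grid : List (List String)) (h x y : Int) (d : Nat) : Prop :=
  (d = 0 ∧ y + 1 < h ∧ pvOpn grid y x ∧ pvOpn grid (y + 1) x) ∨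
  (d = 2 ∧ 1 ≤ y ∧ y < h ∧ pvOpn grid (y - 1) x ∧ pvOpn grid y x)

lemma pvGetD_modify {α : Type} (l : List α) (i j : Nat) (g : α → α) (d : α) :
    (l.modify i g).getD j d = if i = j ∧ j < l.length then g (l.getD j d) else l.getD j d := by
  by_cases h : j < l.length
  · by_cases he : i = j
    · subst he
      simp [List.getD_eq_getElem?_getD, List.getElem?_modify, List.getElem?_eq_getElem h, h]
    · simp [List.getD_eq_getElem?_getD, List.getElem?_modify, he, h]
  · have : l[j]? = none := List.getElem?_eq_none (by omega)
    simp [List.getD_eq_getElem?_getD, List.getElem?_modify, this, h]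

lemma pvGetD_set {α : Type} (l : List α) (i j : Nat) (a d : α) :
    (l.set i a).getD j d = if i = j ∧ j < l.length then a else l.getD j d := by
  by_cases h : j < l.length
  · by_cases he : i = j
    · subst he; simp [List.getD_eq_getElem?_getD, List.getElem?_set, h]
    · simp [List.getD_eq_getElem?_getD, List.getElem?_set, he, h]
  · have : l[j]? = none := List.getElem?_eq_none (by omega)
    simp [List.getD_eq_getElem?_getD, List.getElem?_set, this, h]

lemma pvGet3_set3 (f : List (List (List Int))) (a b : Int) (c : Nat) (x y d : Nat) :
    pvGet3 (pvSet3 f a b c) x y d =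
      if x = a.toNat ∧ y = b.toNat ∧ d = c ∧ x < f.length ∧ y < (f.getD x []).length ∧
          d < ((f.getD x []).getD y []).length
      then 1 else pvGet3 f x y d := by
  unfold pvGet3 pvSet3
  rw [pvGetD_modify]
  by_cases h1 : a.toNat = x ∧ x < f.length
  · rw [if_pos h1, pvGetD_modify]
    by_cases h2 : b.toNat = y ∧ y < (f.getD x []).length
    · rw [if_pos h2, pvGetD_set]
      by_cases h3 : c = d ∧ d < ((f.getD x []).getD y []).length
      · rw [if_pos h3, if_pos ⟨h1.1.symm, h2.1.symm, h3.1.symm, h1.2, h2.2, h3.2⟩]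
      · rw [if_neg h3, if_neg (by rintro ⟨e1, e2, e3, e4, e5, e6⟩; exact h3 ⟨e3.symm, e6⟩)]
    · rw [if_neg h2, if_neg (by rintro ⟨e1, e2, e3, e4, e5, e6⟩; exact h2 ⟨e2.symm, e5⟩)]
  · rw [if_neg h1, if_neg (by rintro ⟨e1, e2, e3, e4, e5, e6⟩; exact h1 ⟨e1.symm, e4⟩)]

lemma pvLen_set3 (f : List (List (List Int))) (a b : Int) (c : Nat) :
    (pvSet3 f a b c).length = f.length := by
  simp [pvSet3]

lemma pvColLen_set3 (f : List (List (List Int))) (a b : Int) (c : Nat) (x : Nat) :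
    ((pvSet3 f a b c).getD x []).length = (f.getD x []).length := by
  unfold pvSet3
  rw [pvGetD_modify]
  split_ifs <;> simp

lemma pvCellLen_set3 (f : List (List (List Int))) (a b : Int) (c : Nat) (x y : Nat) :
    (((pvSet3 f a b c).getD x []).getD y []).length = ((f.getD x []).getD y []).length := by
  unfold pvSet3
  rw [pvGetD_modify]
  split_ifs with h1
  · rw [pvGetD_modify]
    split_ifs <;> simp
  · rfl

lemma pvShape_set3 {w h : Int} {f : List (List (List Int))} (hf : pvShape w h f)
    (a b : Int) (c : Nat) : pvShape w h (pvSet3 f a b c) := by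
  obtain ⟨h1, h2, h3⟩ := hf
  exact ⟨by rw [pvLen_set3, h1],
         fun x hx => by rw [pvColLen_set3]; exact h2 x hx,
         fun x y hx hy => by rw [pvCellLen_set3]; exact h3 x y hx hy⟩

lemma pvGet3_set3_shape {w h : Int} {f : List (List (List Int))} (hf : pvShape w h f)
    {a b : Int} (ha : 0 ≤ a) (ha2 : a < w) (hb : 0 ≤ b) (hb2 : b < h) {c : Nat} (hc : c < 4)
    (x y d : Nat) :
    pvGet3 (pvSet3 f a b c) x y d =
      if (x : Int) = a ∧ (y : Int) = b ∧ d = c then 1 else pvGet3 f x y d := by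
  obtain ⟨h1, h2, h3⟩ := hf
  rw [pvGet3_set3]
  by_cases hR : (x : Int) = a ∧ (y : Int) = b ∧ d = c
  · obtain ⟨e1, e2, e3⟩ := hR
    have hx : x = a.toNat := by omega
    have hy : y = b.toNat := by omega
    have hxw : x < w.toNat := by omega
    have hyh : y < h.toNat := by omega
    rw [if_pos ⟨hx, hy, e3, by omega, by rw [h2 x hxw]; omega, by rw [h3 x y hxw hyh]; omega⟩,
        if_pos ⟨e1, e2, e3⟩]
  · rw [if_neg (by rintro ⟨e1, e2, e3, _⟩; exact hR ⟨by omega, by omega, e3⟩), if_neg hR]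

lemma pvShape_foldl {w h : Int} {α : Type} (step : List (List (List Int)) → α → List (List (List Int)))
    (hstep : ∀ f a, pvShape w h f → pvShape w h (step f a)) :
    ∀ (L : List α) (f : List (List (List Int))), pvShape w h f → pvShape w h (L.foldl step f) := by
  intro L
  induction L with
  | nil => intro f hf; exact hf
  | cons a L ih => intro f hf; exact ih _ (hstep f a hf)

lemma pvShape_bodyA {w h : Int} {f : List (List (List Int))} (hf : pvShape w h f)
    (grid : List (List String)) (x y : Int) : pvShape w h (pvBodyA grid w h x f y) := by
  unfold pvBodyA
  split_ifs <;> (repeat apply pvShape_set3) <;> exact hf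

lemma pvShape_bodyH {w h : Int} {f : List (List (List Int))} (hf : pvShape w h f)
    (grid : List (List String)) (y x : Int) : pvShape w h (pvBodyH grid y f x) := by
  unfold pvBodyH
  split_ifs <;> (repeat apply pvShape_set3) <;> exact hf

lemma pvShape_bodyV {w h : Int} {f : List (List (List Int))} (hf : pvShape w h f)
    (grid : List (List String)) (y x : Int) : pvShape w h (pvBodyV grid y f x) := by
  unfold pvBodyV
  split_ifs <;> (repeat apply pvShape_set3) <;> exact hf

-- the zero field and its properties
lemma pvZero_eq (w h : Int) :
    ((PySem.List.pyRange 0 w 1).map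
      (fun _ => (PySem.List.pyRange 0 h 1).map (fun _ => ([0, 0, 0, 0] : List Int)))) =
    List.replicate w.toNat (List.replicate h.toNat ([0, 0, 0, 0] : List Int)) := by
  simp [List.map_const', PySem.List.length_pyRange_one]

lemma pvShape_zero (w h : Int) :
    pvShape w h ((PySem.List.pyRange 0 w 1).map
      (fun _ => (PySem.List.pyRange 0 h 1).map (fun _ => ([0, 0, 0, 0] : List Int)))) := by
  rw [pvZero_eq]
  refine ⟨by simp, fun x hx => ?_, fun x y hx hy => ?_⟩
  · simp [List.getD_eq_getElem?_getD, List.getElem?_replicate, hx]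
  · simp [List.getD_eq_getElem?_getD, List.getElem?_replicate, hx, hy]

lemma pvGet3_zero (w h : Int) (x y d : Nat) :
    pvGet3 ((PySem.List.pyRange 0 w 1).map
      (fun _ => (PySem.List.pyRange 0 h 1).map (fun _ => ([0, 0, 0, 0] : List Int)))) x y d = 0 := by
  unfold pvGet3
  rw [pvZero_eq]
  by_cases hx : x < w.toNat
  · by_cases hy : y < h.toNat
    · simp only [List.getD_eq_getElem?_getD, List.getElem?_replicate, hx, hy, if_pos,
        Option.getD_some]
      rcases d with _ | _ | _ | _ | d <;> simp [List.getD_eq_getElem?_getD]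
    · simp [List.getD_eq_getElem?_getD, List.getElem?_replicate, hx, hy]
  · simp [List.getD_eq_getElem?_getD, List.getElem?_replicate, hx]

lemma pvShape_cset3 {w h : Int} {f : List (List (List Int))} (hf : pvShape w h f)
    {P : Prop} [Decidable P] (a b : Int) (c : Nat) :
    pvShape w h (if P then pvSet3 f a b c else f) := by
  split_ifs
  · exact pvShape_set3 hf a b c
  · exact hf

lemma pvGet3_cset3 {w h : Int} {f : List (List (List Int))} (hf : pvShape w h f)
    {P : Prop} [Decidable P] {a b : Int} (ha : 0 ≤ a) (ha2 : a < w) (hb : 0 ≤ b) (hb2 : b < h)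
    {c : Nat} (hc : c < 4) (x y d : Nat) :
    pvGet3 (if P then pvSet3 f a b c else f) x y d =
      if P ∧ ((x : Int) = a ∧ (y : Int) = b ∧ d = c) then 1 else pvGet3 f x y d := by
  by_cases hP : P
  · rw [if_pos hP, pvGet3_set3_shape hf ha ha2 hb hb2 hc]
    have : (P ∧ ((x : Int) = a ∧ (y : Int) = b ∧ d = c)) ↔
        ((x : Int) = a ∧ (y : Int) = b ∧ d = c) := by tauto
    exact (if_congr this rfl rfl).symm
  · rw [if_neg hP, if_neg (by tauto)]

lemma pvIfChain2 {Q1 Q2 R : Prop} [Decidable Q1] [Decidable Q2] [Decidable R] {v : Int}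
    (g1 : Q1 → R) (g2 : Q2 → R) (gR : R → Q1 ∨ Q2) :
    (if Q1 then (1 : Int) else if Q2 then 1 else v) = if R then 1 else v := by
  split_ifs <;> tauto

lemma pvIfChain4 {Q1 Q2 Q3 Q4 R : Prop} [Decidable Q1] [Decidable Q2] [Decidable Q3]
    [Decidable Q4] [Decidable R] {v : Int}
    (g1 : Q1 → R) (g2 : Q2 → R) (g3 : Q3 → R) (g4 : Q4 → R) (gR : R → Q1 ∨ Q2 ∨ Q3 ∨ Q4) :
    (if Q1 then (1 : Int) else if Q2 then 1 else if Q3 then 1 else if Q4 then 1 else v) =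
      if R then 1 else v := by
  split_ifs <;> tauto

-- ===== characterization of A =====
lemma pvGet3_bodyA (grid : List (List String)) {w h x y : Int}
    (hx : 0 ≤ x) (hx2 : x < w) (hy : 0 ≤ y) (hy2 : y < h)
    {f : List (List (List Int))} (hf : pvShape w h f) (x' y' d' : Nat) :
    pvGet3 (pvBodyA grid w h x f y) x' y' d' =
      if (x' : Int) = x ∧ (y' : Int) = y ∧ pvCondA grid w h x y d' then 1
      else pvGet3 f x' y' d' := by
  unfold pvBodyA
  by_cases hO : pvGget grid y x = "#"
  · rw [if_pos hO, if_neg (by rintro ⟨-, -, hg, -⟩; exact hg hO)]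
  · rw [if_neg hO]
    dsimp only
    rw [pvGet3_cset3 (pvShape_cset3 (pvShape_cset3 (pvShape_cset3 hf x y 0) x y 1) x y 2)
          hx hx2 hy hy2 (by omega),
        pvGet3_cset3 (pvShape_cset3 (pvShape_cset3 hf x y 0) x y 1) hx hx2 hy hy2 (by omega),
        pvGet3_cset3 (pvShape_cset3 hf x y 0) hx hx2 hy hy2 (by omega),
        pvGet3_cset3 hf hx hx2 hy hy2 (by omega)]
    refine pvIfChain4 ?_ ?_ ?_ ?_ ?_
    · rintro ⟨hc, hx', hy', hd⟩
      exact ⟨hx', hy', hO, Or.inr (Or.inr (Or.inr ⟨hd, hc.1, hc.2⟩))⟩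
    · rintro ⟨hc, hx', hy', hd⟩
      exact ⟨hx', hy', hO, Or.inr (Or.inr (Or.inl ⟨hd, hc.1, hc.2⟩))⟩
    · rintro ⟨hc, hx', hy', hd⟩
      exact ⟨hx', hy', hO, Or.inr (Or.inl ⟨hd, hc.1, hc.2⟩)⟩
    · rintro ⟨hc, hx', hy', hd⟩
      exact ⟨hx', hy', hO, Or.inl ⟨hd, hc.1, hc.2⟩⟩
    · rintro ⟨hx', hy', hopn, hdisj⟩
      rcases hdisj with ⟨hd, hb, hg⟩ | ⟨hd, hb, hg⟩ | ⟨hd, hb, hg⟩ | ⟨hd, hb, hg⟩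
      · exact Or.inr (Or.inr (Or.inr ⟨⟨hb, hg⟩, hx', hy', hd⟩))
      · exact Or.inr (Or.inr (Or.inl ⟨⟨hb, hg⟩, hx', hy', hd⟩))
      · exact Or.inr (Or.inl ⟨⟨hb, hg⟩, hx', hy', hd⟩)
      · exact Or.inl ⟨⟨hb, hg⟩, hx', hy', hd⟩

lemma pvGet3_colA (grid : List (List String)) {w h x : Int}
    (hx : 0 ≤ x) (hx2 : x < w) (n : Nat) (hn : (n : Int) ≤ h)
    {f : List (List (List Int))} (hf : pvShape w h f) (x' y' d' : Nat) :
    pvGet3 ((PySem.List.pyRange 0 (n : Int) 1).foldl (pvBodyA grid w h x) f) x' y' d' =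
      if (x' : Int) = x ∧ (y' : Int) < (n : Int) ∧ pvCondA grid w h x (y' : Int) d' then 1
      else pvGet3 f x' y' d' := by
  induction n with
  | zero =>
    rw [show ((0 : Nat) : Int) = 0 by simp, PySem.List.pyRange_one_eq_nil (le_refl 0)]
    simp only [List.foldl_nil]
    rw [if_neg (by rintro ⟨-, hlt, -⟩; omega)]
  | succ n ih =>
    have hn' : (n : Int) ≤ h := by push_cast at hn ⊢; omega
    have hnh : (n : Int) < h := by push_cast at hn; omega
    rw [show ((n + 1 : Nat) : Int) = (n : Int) + 1 by push_cast; ring,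
        PySem.List.pyRange_one_succ_right (Int.natCast_nonneg n), List.foldl_append,
        List.foldl_cons, List.foldl_nil]
    have hshape : pvShape w h ((PySem.List.pyRange 0 (n : Int) 1).foldl (pvBodyA grid w h x) f) :=
      pvShape_foldl _ (fun f a hf => pvShape_bodyA hf grid x a) _ _ hf
    rw [pvGet3_bodyA grid hx hx2 (Int.natCast_nonneg n) hnh hshape, ih hn']
    refine pvIfChain2 ?_ ?_ ?_
    · rintro ⟨e1, e2, e3⟩
      exact ⟨e1, by omega, by rw [show ((y' : Nat) : Int) = (n : Int) from e2]; exact e3⟩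
    · rintro ⟨e1, e2, e3⟩
      exact ⟨e1, by omega, e3⟩
    · rintro ⟨e1, e2, e3⟩
      by_cases hy : (y' : Int) < (n : Int)
      · exact Or.inr ⟨e1, hy, e3⟩
      · exact Or.inl ⟨e1, by omega, by rw [show ((n : Nat) : Int) = ((y' : Nat) : Int) by omega]; exact e3⟩

lemma pvGet3_outerA (grid : List (List String)) {w h : Int} (hh : 0 ≤ h) (n : Nat)
    (hn : (n : Int) ≤ w)
    {f : List (List (List Int))} (hf : pvShape w h f) (x' y' d' : Nat) :
    pvGet3 ((PySem.List.pyRange 0 (n : Int) 1).foldl (pvColA grid w h) f) x' y' d' =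
      if (x' : Int) < (n : Int) ∧ (y' : Int) < h ∧ pvCondA grid w h (x' : Int) (y' : Int) d'
      then 1 else pvGet3 f x' y' d' := by
  induction n with
  | zero =>
    rw [show ((0 : Nat) : Int) = 0 by simp, PySem.List.pyRange_one_eq_nil (le_refl 0)]
    simp only [List.foldl_nil]
    rw [if_neg (by rintro ⟨hlt, -, -⟩; omega)]
  | succ n ih =>
    have hn' : (n : Int) ≤ w := by push_cast at hn ⊢; omega
    have hnw : (n : Int) < w := by push_cast at hn; omega
    rw [show ((n + 1 : Nat) : Int) = (n : Int) + 1 by push_cast; ring,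
        PySem.List.pyRange_one_succ_right (Int.natCast_nonneg n), List.foldl_append,
        List.foldl_cons, List.foldl_nil]
    have hshape : pvShape w h ((PySem.List.pyRange 0 (n : Int) 1).foldl (pvColA grid w h) f) :=
      pvShape_foldl _
        (fun f a hf => pvShape_foldl _ (fun f b hf => pvShape_bodyA hf grid a b) _ _ hf) _ _ hf
    have hcol : ∀ (g : List (List (List Int))), pvShape w h g →
        pvGet3 (pvColA grid w h g (n : Int)) x' y' d' =
          if (x' : Int) = (n : Int) ∧ (y' : Int) < h ∧ pvCondA grid w h (n : Int) (y' : Int) d'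
          then 1 else pvGet3 g x' y' d' := by
      intro g hg
      unfold pvColA
      rw [show (h : Int) = ((h.toNat : Nat) : Int) by omega] at *
      exact pvGet3_colA grid (Int.natCast_nonneg n) hnw h.toNat (le_refl _) hg x' y' d'
    rw [hcol _ hshape, ih hn']
    refine pvIfChain2 ?_ ?_ ?_
    · rintro ⟨e1, e2, e3⟩
      exact ⟨by omega, e2, by rw [show ((x' : Nat) : Int) = (n : Int) from e1]; exact e3⟩
    · rintro ⟨e1, e2, e3⟩
      exact ⟨by omega, e2, e3⟩
    · rintro ⟨e1, e2, e3⟩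
      by_cases hx : (x' : Int) < (n : Int)
      · exact Or.inr ⟨hx, e2, e3⟩
      · exact Or.inl ⟨by omega, e2, by rw [show ((n : Nat) : Int) = ((x' : Nat) : Int) by omega]; exact e3⟩

-- ===== characterization of B =====
lemma pvGet3_bodyH (grid : List (List String)) {w h x y : Int}
    (hx : 0 ≤ x) (hx2 : x + 1 < w) (hy : 0 ≤ y) (hy2 : y < h)
    {f : List (List (List Int))} (hf : pvShape w h f) (x' y' d' : Nat) :
    pvGet3 (pvBodyH grid y f x) x' y' d' =
      if (y' : Int) = y ∧ pvOpn grid y x ∧ pvOpn grid y (x + 1) ∧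
          (((x' : Int) = x ∧ d' = 1) ∨ ((x' : Int) = x + 1 ∧ d' = 3))
      then 1 else pvGet3 f x' y' d' := by
  unfold pvBodyH
  by_cases hc : pvGget grid y x ≠ "#" ∧ pvGget grid y (x + 1) ≠ "#"
  · rw [if_pos hc,
        pvGet3_set3_shape (pvShape_set3 hf x y 1) (by omega) hx2 hy hy2 (by omega),
        pvGet3_set3_shape hf hx (by omega) hy hy2 (by omega)]
    refine pvIfChain2 ?_ ?_ ?_
    · rintro ⟨e1, e2, e3⟩
      exact ⟨e2, hc.1, hc.2, Or.inr ⟨e1, e3⟩⟩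
    · rintro ⟨e1, e2, e3⟩
      exact ⟨e2, hc.1, hc.2, Or.inl ⟨e1, e3⟩⟩
    · rintro ⟨e1, -, -, hcase⟩
      rcases hcase with ⟨e2, e3⟩ | ⟨e2, e3⟩
      · exact Or.inr ⟨e2, e1, e3⟩
      · exact Or.inl ⟨e2, e1, e3⟩
  · rw [if_neg hc, if_neg (by rintro ⟨-, o1, o2, -⟩; exact hc ⟨o1, o2⟩)]

lemma pvGet3_bodyV (grid : List (List String)) {w h x y : Int}
    (hx : 0 ≤ x) (hx2 : x < w) (hy : 0 ≤ y) (hy2 : y + 1 < h)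
    {f : List (List (List Int))} (hf : pvShape w h f) (x' y' d' : Nat) :
    pvGet3 (pvBodyV grid y f x) x' y' d' =
      if (x' : Int) = x ∧ pvOpn grid y x ∧ pvOpn grid (y + 1) x ∧
          (((y' : Int) = y ∧ d' = 0) ∨ ((y' : Int) = y + 1 ∧ d' = 2))
      then 1 else pvGet3 f x' y' d' := by
  unfold pvBodyV
  by_cases hc : pvGget grid y x ≠ "#" ∧ pvGget grid (y + 1) x ≠ "#"
  · rw [if_pos hc,
        pvGet3_set3_shape (pvShape_set3 hf x y 0) hx hx2 (by omega) hy2 (by omega),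
        pvGet3_set3_shape hf hx hx2 hy (by omega) (by omega)]
    refine pvIfChain2 ?_ ?_ ?_
    · rintro ⟨e1, e2, e3⟩
      exact ⟨e1, hc.1, hc.2, Or.inr ⟨e2, e3⟩⟩
    · rintro ⟨e1, e2, e3⟩
      exact ⟨e1, hc.1, hc.2, Or.inl ⟨e2, e3⟩⟩
    · rintro ⟨e1, -, -, hcase⟩
      rcases hcase with ⟨e2, e3⟩ | ⟨e2, e3⟩
      · exact Or.inr ⟨e1, e2, e3⟩
      · exact Or.inl ⟨e1, e2, e3⟩
  · rw [if_neg hc, if_neg (by rintro ⟨-, o1, o2, -⟩; exact hc ⟨o1, o2⟩)]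

lemma pvGet3_rowH (grid : List (List String)) {w h y : Int}
    (hy : 0 ≤ y) (hy2 : y < h) (n : Nat) (hn : (n : Int) ≤ w - 1)
    {f : List (List (List Int))} (hf : pvShape w h f) (x' y' d' : Nat) :
    pvGet3 ((PySem.List.pyRange 0 (n : Int) 1).foldl (pvBodyH grid y) f) x' y' d' =
      if (y' : Int) = y ∧
          ((d' = 1 ∧ (x' : Int) < (n : Int) ∧ pvOpn grid y (x' : Int) ∧ pvOpn grid y ((x' : Int) + 1)) ∨
           (d' = 3 ∧ 1 ≤ (x' : Int) ∧ (x' : Int) < (n : Int) + 1 ∧ pvOpn grid y ((x' : Int) - 1) ∧ pvOpn grid y (x' : Int)))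
      then 1 else pvGet3 f x' y' d' := by
  induction n with
  | zero =>
    rw [show ((0 : Nat) : Int) = 0 by simp, PySem.List.pyRange_one_eq_nil (le_refl 0)]
    simp only [List.foldl_nil]
    rw [if_neg (by rintro ⟨-, ⟨-, hlt, -⟩ | ⟨-, h1, hlt, -⟩⟩ <;> omega)]
  | succ n ih =>
    have hn' : (n : Int) ≤ w - 1 := by push_cast at hn ⊢; omega
    rw [show ((n + 1 : Nat) : Int) = (n : Int) + 1 by push_cast; ring,
        PySem.List.pyRange_one_succ_right (Int.natCast_nonneg n), List.foldl_append,
        List.foldl_cons, List.foldl_nil]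
    have hshape : pvShape w h ((PySem.List.pyRange 0 (n : Int) 1).foldl (pvBodyH grid y) f) :=
      pvShape_foldl _ (fun f a hf => pvShape_bodyH hf grid y a) _ _ hf
    rw [pvGet3_bodyH grid (Int.natCast_nonneg n) (by push_cast at hn; omega) hy hy2 hshape,
        ih hn']
    refine pvIfChain2 ?_ ?_ ?_
    · rintro ⟨hy', o1, o2, hcase⟩
      rcases hcase with ⟨he, hd⟩ | ⟨he, hd⟩
      · exact ⟨hy', Or.inl ⟨hd, by omega, by rw [he]; exact o1, by rw [he]; exact o2⟩⟩
      · exact ⟨hy', Or.inr ⟨hd, by omega, by omega,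
          by rw [show ((x' : Nat) : Int) - 1 = (n : Int) by omega]; exact o1,
          by rw [he]; exact o2⟩⟩
    · rintro ⟨hy', hcase⟩
      refine ⟨hy', ?_⟩
      rcases hcase with ⟨hd, hlt, o1, o2⟩ | ⟨hd, h1, hlt, o1, o2⟩
      · exact Or.inl ⟨hd, by omega, o1, o2⟩
      · exact Or.inr ⟨hd, h1, by omega, o1, o2⟩
    · rintro ⟨hy', hcase⟩
      rcases hcase with ⟨hd, hlt, o1, o2⟩ | ⟨hd, h1, hlt, o1, o2⟩
      · by_cases hx : (x' : Int) < (n : Int)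
        · exact Or.inr ⟨hy', Or.inl ⟨hd, hx, o1, o2⟩⟩
        · have he : ((x' : Nat) : Int) = (n : Int) := by omega
          exact Or.inl ⟨hy', by rw [← he]; exact o1, by rw [← he]; exact o2,
            Or.inl ⟨he, hd⟩⟩
      · by_cases hx : (x' : Int) < (n : Int) + 1
        · exact Or.inr ⟨hy', Or.inr ⟨hd, h1, hx, o1, o2⟩⟩
        · have he : ((x' : Nat) : Int) = (n : Int) + 1 := by omega
          exact Or.inl ⟨hy', by rw [show (n : Int) = ((x' : Nat) : Int) - 1 by omega]; exact o1,
            by rw [← he]; exact o2, Or.inr ⟨he, hd⟩⟩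

lemma pvGet3_rowV (grid : List (List String)) {w h y : Int}
    (hy : 0 ≤ y) (hy2 : y + 1 < h) (n : Nat) (hn : (n : Int) ≤ w)
    {f : List (List (List Int))} (hf : pvShape w h f) (x' y' d' : Nat) :
    pvGet3 ((PySem.List.pyRange 0 (n : Int) 1).foldl (pvBodyV grid y) f) x' y' d' =
      if (x' : Int) < (n : Int) ∧ pvOpn grid y (x' : Int) ∧ pvOpn grid (y + 1) (x' : Int) ∧
          (((y' : Int) = y ∧ d' = 0) ∨ ((y' : Int) = y + 1 ∧ d' = 2))
      then 1 else pvGet3 f x' y' d' := by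
  induction n with
  | zero =>
    rw [show ((0 : Nat) : Int) = 0 by simp, PySem.List.pyRange_one_eq_nil (le_refl 0)]
    simp only [List.foldl_nil]
    rw [if_neg (by rintro ⟨hlt, -⟩; omega)]
  | succ n ih =>
    have hn' : (n : Int) ≤ w := by push_cast at hn ⊢; omega
    rw [show ((n + 1 : Nat) : Int) = (n : Int) + 1 by push_cast; ring,
        PySem.List.pyRange_one_succ_right (Int.natCast_nonneg n), List.foldl_append,
        List.foldl_cons, List.foldl_nil]
    have hshape : pvShape w h ((PySem.List.pyRange 0 (n : Int) 1).foldl (pvBodyV grid y) f) :=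
      pvShape_foldl _ (fun f a hf => pvShape_bodyV hf grid y a) _ _ hf
    rw [pvGet3_bodyV grid (Int.natCast_nonneg n) (by push_cast at hn; omega) hy hy2 hshape,
        ih hn']
    refine pvIfChain2 ?_ ?_ ?_
    · rintro ⟨he, o1, o2, hcase⟩
      exact ⟨by omega, by rw [he]; exact o1, by rw [he]; exact o2, hcase⟩
    · rintro ⟨hlt, o1, o2, hcase⟩
      exact ⟨by omega, o1, o2, hcase⟩
    · rintro ⟨hlt, o1, o2, hcase⟩
      by_cases hx : (x' : Int) < (n : Int)
      · exact Or.inr ⟨hx, o1, o2, hcase⟩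
      · have he : ((x' : Nat) : Int) = (n : Int) := by omega
        exact Or.inl ⟨he, by rw [← he]; exact o1, by rw [← he]; exact o2, hcase⟩

lemma pvShape_rowH {w h : Int} {f : List (List (List Int))} (hf : pvShape w h f)
    (grid : List (List String)) (y : Int) : pvShape w h (pvRowH grid w f y) :=
  pvShape_foldl _ (fun f a hf => pvShape_bodyH hf grid y a) _ _ hf

lemma pvShape_rowV {w h : Int} {f : List (List (List Int))} (hf : pvShape w h f)
    (grid : List (List String)) (y : Int) : pvShape w h (pvRowV grid w f y) :=
  pvShape_foldl _ (fun f a hf => pvShape_bodyV hf grid y a) _ _ hf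

lemma pvGet3_pass1 (grid : List (List String)) {w h : Int} (hw : 0 ≤ w) (n : Nat)
    (hn : (n : Int) ≤ h)
    {f : List (List (List Int))} (hf : pvShape w h f) (x' y' d' : Nat) :
    pvGet3 ((PySem.List.pyRange 0 (n : Int) 1).foldl (pvRowH grid w) f) x' y' d' =
      if (y' : Int) < (n : Int) ∧ pvCondH grid w (x' : Int) (y' : Int) d' then 1
      else pvGet3 f x' y' d' := by
  induction n with
  | zero =>
    rw [show ((0 : Nat) : Int) = 0 by simp, PySem.List.pyRange_one_eq_nil (le_refl 0)]
    simp only [List.foldl_nil]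
    rw [if_neg (by rintro ⟨hlt, -⟩; omega)]
  | succ n ih =>
    have hn' : (n : Int) ≤ h := by push_cast at hn ⊢; omega
    have hnh : (n : Int) < h := by push_cast at hn; omega
    rw [show ((n + 1 : Nat) : Int) = (n : Int) + 1 by push_cast; ring,
        PySem.List.pyRange_one_succ_right (Int.natCast_nonneg n), List.foldl_append,
        List.foldl_cons, List.foldl_nil]
    have hshape : pvShape w h ((PySem.List.pyRange 0 (n : Int) 1).foldl (pvRowH grid w) f) :=
      pvShape_foldl _ (fun f a hf => pvShape_rowH hf grid a) _ _ hf
    have hrow : ∀ g, pvShape w h g →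
        pvGet3 (pvRowH grid w g (n : Int)) x' y' d' =
          if (y' : Int) = (n : Int) ∧ pvCondH grid w (x' : Int) (n : Int) d' then 1
          else pvGet3 g x' y' d' := by
      intro g hg
      unfold pvRowH
      by_cases hw1 : 1 ≤ w
      · rw [show (w : Int) - 1 = (((w - 1 : Int).toNat : Nat) : Int) by omega,
            pvGet3_rowH grid (Int.natCast_nonneg n) hnh (w - 1 : Int).toNat (by omega) hg x' y' d']
        refine if_congr ?_ rfl rfl
        constructor
        · rintro ⟨hy'e, ⟨hd, hlt, o1, o2⟩ | ⟨hd, h1, hlt, o1, o2⟩⟩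
          · exact ⟨hy'e, Or.inl ⟨hd, by omega, o1, o2⟩⟩
          · exact ⟨hy'e, Or.inr ⟨hd, h1, by omega, o1, o2⟩⟩
        · rintro ⟨hy'e, ⟨hd, hlt, o1, o2⟩ | ⟨hd, h1, hlt, o1, o2⟩⟩
          · exact ⟨hy'e, Or.inl ⟨hd, by omega, o1, o2⟩⟩
          · exact ⟨hy'e, Or.inr ⟨hd, h1, by omega, o1, o2⟩⟩
      · rw [PySem.List.pyRange_one_eq_nil (by omega : (w : Int) - 1 ≤ 0)]
        simp only [List.foldl_nil]
        rw [if_neg (by rintro ⟨-, ⟨-, hlt, -⟩ | ⟨-, -, hlt, -⟩⟩ <;> omega)]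
    rw [hrow _ hshape, ih hn']
    refine pvIfChain2 ?_ ?_ ?_
    · rintro ⟨he, hc⟩
      exact ⟨by omega, by rw [he]; exact hc⟩
    · rintro ⟨hlt, hc⟩
      exact ⟨by omega, hc⟩
    · rintro ⟨hlt, hc⟩
      by_cases hy : (y' : Int) < (n : Int)
      · exact Or.inr ⟨hy, hc⟩
      · have he : ((y' : Nat) : Int) = (n : Int) := by omega
        exact Or.inl ⟨he, by rw [← he]; exact hc⟩

lemma pvGet3_pass2 (grid : List (List String)) {w h : Int} (hw : 0 ≤ w) (n : Nat)
    (hn : (n : Int) ≤ h - 1)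
    {f : List (List (List Int))} (hf : pvShape w h f) (x' y' d' : Nat) :
    pvGet3 ((PySem.List.pyRange 0 (n : Int) 1).foldl (pvRowV grid w) f) x' y' d' =
      if (x' : Int) < w ∧
          ((d' = 0 ∧ (y' : Int) < (n : Int) ∧ pvOpn grid (y' : Int) (x' : Int) ∧ pvOpn grid ((y' : Int) + 1) (x' : Int)) ∨
           (d' = 2 ∧ 1 ≤ (y' : Int) ∧ (y' : Int) < (n : Int) + 1 ∧ pvOpn grid ((y' : Int) - 1) (x' : Int) ∧ pvOpn grid (y' : Int) (x' : Int)))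
      then 1 else pvGet3 f x' y' d' := by
  induction n with
  | zero =>
    rw [show ((0 : Nat) : Int) = 0 by simp, PySem.List.pyRange_one_eq_nil (le_refl 0)]
    simp only [List.foldl_nil]
    rw [if_neg (by rintro ⟨-, ⟨-, hlt, -⟩ | ⟨-, h1, hlt, -⟩⟩ <;> omega)]
  | succ n ih =>
    have hn' : (n : Int) ≤ h - 1 := by push_cast at hn ⊢; omega
    have hnh : (n : Int) + 1 < h := by push_cast at hn; omega
    rw [show ((n + 1 : Nat) : Int) = (n : Int) + 1 by push_cast; ring,
        PySem.List.pyRange_one_succ_right (Int.natCast_nonneg n), List.foldl_append,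
        List.foldl_cons, List.foldl_nil]
    have hshape : pvShape w h ((PySem.List.pyRange 0 (n : Int) 1).foldl (pvRowV grid w) f) :=
      pvShape_foldl _ (fun f a hf => pvShape_rowV hf grid a) _ _ hf
    have hrow : ∀ g, pvShape w h g →
        pvGet3 (pvRowV grid w g (n : Int)) x' y' d' =
          if (x' : Int) < w ∧ pvOpn grid (n : Int) (x' : Int) ∧ pvOpn grid ((n : Int) + 1) (x' : Int) ∧
              (((y' : Int) = (n : Int) ∧ d' = 0) ∨ ((y' : Int) = (n : Int) + 1 ∧ d' = 2))
          then 1 else pvGet3 g x' y' d' := by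
      intro g hg
      unfold pvRowV
      rw [show (w : Int) = ((w.toNat : Nat) : Int) by omega,
          pvGet3_rowV grid (Int.natCast_nonneg n) hnh w.toNat (by omega) hg x' y' d']
    rw [hrow _ hshape, ih hn']
    refine pvIfChain2 ?_ ?_ ?_
    · rintro ⟨hxw, o1, o2, hcase⟩
      rcases hcase with ⟨he, hd⟩ | ⟨he, hd⟩
      · exact ⟨hxw, Or.inl ⟨hd, by omega, by rw [he]; exact o1, by rw [he]; exact o2⟩⟩
      · exact ⟨hxw, Or.inr ⟨hd, by omega, by omega,
          by rw [show ((y' : Nat) : Int) - 1 = (n : Int) by omega]; exact o1,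
          by rw [he]; exact o2⟩⟩
    · rintro ⟨hxw, hcase⟩
      refine ⟨hxw, ?_⟩
      rcases hcase with ⟨hd, hlt, o1, o2⟩ | ⟨hd, h1, hlt, o1, o2⟩
      · exact Or.inl ⟨hd, by omega, o1, o2⟩
      · exact Or.inr ⟨hd, h1, by omega, o1, o2⟩
    · rintro ⟨hxw, hcase⟩
      rcases hcase with ⟨hd, hlt, o1, o2⟩ | ⟨hd, h1, hlt, o1, o2⟩
      · by_cases hy : (y' : Int) < (n : Int)
        · exact Or.inr ⟨hxw, Or.inl ⟨hd, hy, o1, o2⟩⟩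
        · have he : ((y' : Nat) : Int) = (n : Int) := by omega
          exact Or.inl ⟨hxw, by rw [← he]; exact o1, by rw [← he]; exact o2, Or.inl ⟨he, hd⟩⟩
      · by_cases hy : (y' : Int) < (n : Int) + 1
        · exact Or.inr ⟨hxw, Or.inr ⟨hd, h1, hy, o1, o2⟩⟩
        · have he : ((y' : Nat) : Int) = (n : Int) + 1 := by omega
          exact Or.inl ⟨hxw, by rw [show (n : Int) = ((y' : Nat) : Int) - 1 by omega]; exact o1,
            by rw [← he]; exact o2, Or.inr ⟨he, hd⟩⟩

-- ===== putting it together =====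
lemma pvEq_of_shape_get3 {w h : Int} {f g : List (List (List Int))}
    (hf : pvShape w h f) (hg : pvShape w h g)
    (hfg : ∀ x y d : Nat, pvGet3 f x y d = pvGet3 g x y d) : f = g := by
  obtain ⟨hf1, hf2, hf3⟩ := hf
  obtain ⟨hg1, hg2, hg3⟩ := hg
  refine List.ext_getElem (by rw [hf1, hg1]) (fun x hx1 hx2 => ?_)
  have hxw : x < w.toNat := by rw [← hf1]; exact hx1
  have hcf : f.getD x [] = f[x] := List.getD_eq_getElem f [] hx1
  have hcg : g.getD x [] = g[x] := List.getD_eq_getElem g [] hx2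
  refine List.ext_getElem (by rw [← hcf, ← hcg, hf2 x hxw, hg2 x hxw]) (fun y hy1 hy2 => ?_)
  have hyh : y < h.toNat := by rw [← hf2 x hxw, hcf]; exact hy1
  have hdf : (f.getD x []).getD y [] = f[x][y] := by
    rw [hcf]; exact List.getD_eq_getElem _ _ hy1
  have hdg : (g.getD x []).getD y [] = g[x][y] := by
    rw [hcg]; exact List.getD_eq_getElem _ _ hy2
  refine List.ext_getElem (by rw [← hdf, ← hdg, hf3 x y hxw hyh, hg3 x y hxw hyh])
    (fun d hd1 hd2 => ?_)
  calc f[x][y][d] = ((f.getD x []).getD y []).getD d 0 := by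
        rw [hdf]; exact (List.getD_eq_getElem _ _ hd1).symm
    _ = pvGet3 f x y d := rfl
    _ = pvGet3 g x y d := hfg x y d
    _ = g[x][y][d] := by rw [pvGet3, hdg]; exact List.getD_eq_getElem _ _ hd2

lemma pvShape_A (grid : List (List String)) :
    pvShape ((PySem.List.pyGetD grid 0 ([] : List String)).length : Int) (grid.length : Int)
      (build_field_from_map grid) := by
  unfold build_field_from_map
  exact pvShape_foldl _
    (fun f a hf => pvShape_foldl _ (fun f b hf => pvShape_bodyA hf grid a b) _ _ hf) _ _
    (pvShape_zero _ _)

lemma pvShape_B (grid : List (List String)) :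
    pvShape ((PySem.List.pyGetD grid 0 ([] : List String)).length : Int) (grid.length : Int)
      (build_field_from_map_alt grid) := by
  unfold build_field_from_map_alt
  exact pvShape_foldl _ (fun f a hf => pvShape_rowV hf grid a) _ _
    (pvShape_foldl _ (fun f a hf => pvShape_rowH hf grid a) _ _ (pvShape_zero _ _))

lemma pvGet3_A (grid : List (List String)) (x' y' d' : Nat) :
    pvGet3 (build_field_from_map grid) x' y' d' =
      if (x' : Int) < ((PySem.List.pyGetD grid 0 ([] : List String)).length : Int) ∧
          (y' : Int) < (grid.length : Int) ∧
          pvCondA grid ((PySem.List.pyGetD grid 0 ([] : List String)).length : Int)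
            (grid.length : Int) (x' : Int) (y' : Int) d'
      then 1 else 0 := by
  unfold build_field_from_map
  dsimp only
  rw [pvGet3_outerA grid (Int.natCast_nonneg _) (PySem.List.pyGetD grid 0 ([] : List String)).length
        (le_refl _) (pvShape_zero _ _) x' y' d', pvGet3_zero]

lemma pvGet3_B (grid : List (List String)) (hgrid : grid ≠ []) (x' y' d' : Nat) :
    pvGet3 (build_field_from_map_alt grid) x' y' d' =
      if ((x' : Int) < ((PySem.List.pyGetD grid 0 ([] : List String)).length : Int) ∧
            pvCondV grid (grid.length : Int) (x' : Int) (y' : Int) d') ∨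
         ((y' : Int) < (grid.length : Int) ∧
            pvCondH grid ((PySem.List.pyGetD grid 0 ([] : List String)).length : Int) (x' : Int) (y' : Int) d')
      then 1 else 0 := by
  have hlen : (0 : Int) < (grid.length : Int) := by
    cases grid with
    | nil => exact absurd rfl hgrid
    | cons a l => simp
  unfold build_field_from_map_alt
  dsimp only
  rw [show ((grid.length : Int) - 1) = (((grid.length - 1 : Nat) : Nat) : Int) by omega]
  rw [pvGet3_pass2 grid (Int.natCast_nonneg _) (grid.length - 1) (by omega)
        (pvShape_foldl _ (fun f a hf => pvShape_rowH hf grid a) _ _ (pvShape_zero _ _)) x' y' d',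
      pvGet3_pass1 grid (Int.natCast_nonneg _) grid.length (le_refl _) (pvShape_zero _ _) x' y' d',
      pvGet3_zero]
  refine pvIfChain2 ?_ ?_ ?_
  · rintro ⟨hxw, ⟨hd, hb, o1, o2⟩ | ⟨hd, h1, hb, o1, o2⟩⟩
    · exact Or.inl ⟨hxw, Or.inl ⟨hd, by omega, o1, o2⟩⟩
    · exact Or.inl ⟨hxw, Or.inr ⟨hd, h1, by omega, o1, o2⟩⟩
  · rintro ⟨hyh, hc⟩
    exact Or.inr ⟨hyh, hc⟩
  · rintro (⟨hxw, ⟨hd, hb, o1, o2⟩ | ⟨hd, h1, hb, o1, o2⟩⟩ | ⟨hyh, hc⟩)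
    · exact Or.inl ⟨hxw, Or.inl ⟨hd, by omega, o1, o2⟩⟩
    · exact Or.inl ⟨hxw, Or.inr ⟨hd, h1, by omega, o1, o2⟩⟩
    · exact Or.inr ⟨hyh, hc⟩

-- ===== VERDICT (by name: the statement is the Claim_ definition above) =====
theorem build_field_from_map_spec : Claim_equal_build_field_from_map := by
  intro grid _ hpre
  unfold Spec_build_field_from_map
  refine pvEq_of_shape_get3 (pvShape_A grid) (pvShape_B grid) (fun x y d => ?_)
  rw [pvGet3_A, pvGet3_B grid hpre.1]
  refine if_congr ?_ rfl rfl
  constructor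
  · rintro ⟨hxw, hyh, hopn, hdisj⟩
    rcases hdisj with ⟨hd, hb, hg⟩ | ⟨hd, hb, hg⟩ | ⟨hd, hb, hg⟩ | ⟨hd, hb, hg⟩
    · exact Or.inl ⟨hxw, Or.inl ⟨hd, hb, hopn, hg⟩⟩
    · exact Or.inr ⟨hyh, Or.inl ⟨hd, hb, hopn, hg⟩⟩
    · exact Or.inl ⟨hxw, Or.inr ⟨hd, by omega, hyh, hg, hopn⟩⟩
    · exact Or.inr ⟨hyh, Or.inr ⟨hd, by omega, hxw, hg, hopn⟩⟩
  · rintro (⟨hxw, ⟨hd, hb, o1, o2⟩ | ⟨hd, h1, hb, o1, o2⟩⟩ |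
            ⟨hyh, ⟨hd, hb, o1, o2⟩ | ⟨hd, h1, hb, o1, o2⟩⟩)
    · exact ⟨hxw, by omega, o1, Or.inl ⟨hd, hb, o2⟩⟩
    · exact ⟨hxw, hb, o2, Or.inr (Or.inr (Or.inl ⟨hd, by omega, o1⟩))⟩
    · exact ⟨by omega, hyh, o1, Or.inr (Or.inl ⟨hd, hb, o2⟩)⟩
    · exact ⟨hb, hyh, o2, Or.inr (Or.inr (Or.inr ⟨hd, by omega, o1⟩))⟩
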